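-- pv_equiv track=rewrite | github.com/chenwangfang/A-Multilevel-Logistic-Regression-Analysis | Python脚本/SPAADIA分析脚本/sensitivity_analysis.py | _check_major_breaks_consistency
-- ===== SOURCE A (Python) =====
-- from typing import Dict, List, Tuple, Optional
--
-- def _check_major_breaks_consistency(results: Dict) -> bool:
--     """检查主要断点的一致性"""
--     # 获取所有阈值下的前3个断点
--     major_breaks = []
--     for key in results:
--         if key.startswith('threshold_'):
--             breaks = results[key]['breakpoint_positions'][:3]
--             major_breaks.append(set(breaks))
--
--     if not major_breaks:
--         return True
--
--     # 计算交集
--     common_breaks = major_breaks[0]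
--     for breaks in major_breaks[1:]:
--         common_breaks = common_breaks.intersection(breaks)
--
--     # 如果至少有1个共同的主要断点，认为一致
--     return len(common_breaks) >= 1
-- ===== SOURCE B (Python) =====
-- from typing import Dict
--
-- def _check_major_breaks_consistency(results: Dict) -> bool:
--     """检查主要断点的一致性 — frequency table instead of progressive set intersection"""
--     counts = {}
--     n = 0
--     for key, value in results.items():
--         if key.startswith('threshold_'):
--             n += 1
--             for b in set(value['breakpoint_positions'][:3]):
--                 counts[b] = counts.get(b, 0) + 1
--     if n == 0:
--         return True
--     # a breakpoint common to all thresholds' top-3 appears in every one of the n sets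
--     return any(c == n for c in counts.values())
-- ===== Notes on version B (the rewrite author's own statement) =====
-- stated objective: alternative
-- what changed: Replaces the two-phase collect-sets-then-fold-intersection with a single pass that builds a frequency table of top-3 breakpoints and checks whether some breakpoint's count equals the number of threshold entries.
import Mathlib
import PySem

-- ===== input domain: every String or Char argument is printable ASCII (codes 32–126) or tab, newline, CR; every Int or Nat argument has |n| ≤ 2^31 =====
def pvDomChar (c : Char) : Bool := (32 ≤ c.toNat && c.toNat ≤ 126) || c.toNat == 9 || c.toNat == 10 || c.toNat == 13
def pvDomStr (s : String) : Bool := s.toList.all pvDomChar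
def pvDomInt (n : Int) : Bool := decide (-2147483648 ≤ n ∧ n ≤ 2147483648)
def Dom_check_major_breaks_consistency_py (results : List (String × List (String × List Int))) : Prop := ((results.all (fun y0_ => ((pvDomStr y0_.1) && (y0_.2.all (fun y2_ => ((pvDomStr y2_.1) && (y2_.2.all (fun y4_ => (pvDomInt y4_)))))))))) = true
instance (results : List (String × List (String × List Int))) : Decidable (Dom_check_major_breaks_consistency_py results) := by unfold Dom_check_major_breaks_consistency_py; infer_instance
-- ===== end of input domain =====

-- One honest line: B replaces A's collect-all-top-3-sets-then-fold-intersection with a single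
-- pass maintaining a frequency table (dict) of top-3 breakpoints plus a threshold counter;
-- equivalence of the return values is proved below (neither version mutates its argument).

-- shared sub-expression of both sources: set(value['breakpoint_positions'][:3])
def pvTop3Set (value : List (String × List Int)) : List Int :=
  PySem.Set.ofList (PySem.List.slice ((PySem.Dict.ofList value).getD "breakpoint_positions" []) none (some 3))

-- ===== PORT A =====
def check_major_breaks_consistency_py (results : List (String × List (String × List Int))) : Bool :=
  let major_breaks : List (List Int) :=
    results.foldl (fun acc kv =>
      if PySem.Str.startswith kv.1 "threshold_" then acc ++ [pvTop3Set kv.2] else acc) []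
  match major_breaks with
  | [] => true
  | first :: rest =>
    let common_breaks := rest.foldl PySem.Set.inter first
    decide (1 ≤ PySem.Set.len common_breaks)

-- ===== PORT B =====
def check_major_breaks_consistency_py_alt (results : List (String × List (String × List Int))) : Bool :=
  let st : PySem.Dict Int Int × Int :=
    results.foldl (fun (st : PySem.Dict Int Int × Int) kv =>
      if PySem.Str.startswith kv.1 "threshold_" then
        ((pvTop3Set kv.2).foldl (fun d b => d.insert b (d.getD b 0 + 1)) st.1, st.2 + 1)
      else st) (PySem.Dict.empty, 0)
  if st.2 == 0 then true
  else (PySem.Dict.values st.1).any (fun c => c == st.2)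

-- ===== PRECONDITION & SPEC =====
-- Pre_ excludes (a) threshold_ entries whose inner dict lacks 'breakpoint_positions', where the
-- Python A raises KeyError (B raises too), and (b) association lists with duplicate keys (outer,
-- or inner on a threshold_ entry), which a Python dict cannot represent at all, so neither
-- program's behaviour is specified for them.
def Pre_check_major_breaks_consistency_py (results : List (String × List (String × List Int))) : Prop :=
  (results.map Prod.fst).Nodup ∧
  ∀ kv ∈ results, PySem.Str.startswith kv.1 "threshold_" = true →
    ((kv.2.map Prod.fst).Nodup ∧ "breakpoint_positions" ∈ kv.2.map Prod.fst)
instance (results : List (String × List (String × List Int))) : Decidable (Pre_check_major_breaks_consistency_py results) := by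
  unfold Pre_check_major_breaks_consistency_py; infer_instance

def pvWitness_check_major_breaks_consistency_py : (List (String × List (String × List Int))) :=
  [("threshold_05", [("breakpoint_positions", [10, 25, 40])]),
   ("threshold_10", [("breakpoint_positions", [25, 7])])]

def Spec_check_major_breaks_consistency_py (results : List (String × List (String × List Int))) (out : Bool) : Prop := out = check_major_breaks_consistency_py_alt results
instance (results : List (String × List (String × List Int))) (out : Bool) : Decidable (Spec_check_major_breaks_consistency_py results out) := by unfold Spec_check_major_breaks_consistency_py; infer_instance

-- ===== CLAIM (what is proved, stated in full; the proofs are below) =====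
def Claim_equal_check_major_breaks_consistency_py : Prop := ∀ (results : List (String × List (String × List Int))), Dom_check_major_breaks_consistency_py results → Pre_check_major_breaks_consistency_py results → Spec_check_major_breaks_consistency_py results (check_major_breaks_consistency_py results)

-- ===== LEMMAS AND PROOFS =====

-- the list of top-3 sets of the threshold_ entries, in order
def pvTS (results : List (String × List (String × List Int))) : List (List Int) :=
  (results.filter (fun kv => PySem.Str.startswith kv.1 "threshold_")).map (fun kv => pvTop3Set kv.2)

-- one counting step of B: add one threshold's (deduplicated) top-3 set to the frequency table
def pvStep (d : PySem.Dict Int Int) (s : List Int) : PySem.Dict Int Int :=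
  s.foldl (fun d b => d.insert b (d.getD b 0 + 1)) d

lemma pvA_fold (results : List (String × List (String × List Int))) :
    results.foldl (fun acc kv =>
      if PySem.Str.startswith kv.1 "threshold_" then acc ++ [pvTop3Set kv.2] else acc) [] = pvTS results := by
  simpa using PySem.List.foldl_append_if (fun kv => PySem.Str.startswith kv.1 "threshold_")
    (fun kv => pvTop3Set kv.2) (l := results) (acc := [])

lemma pvTS_cons (kv : String × List (String × List Int)) (rest : List (String × List (String × List Int))) :
    pvTS (kv :: rest) = if PySem.Str.startswith kv.1 "threshold_" then pvTop3Set kv.2 :: pvTS rest else pvTS rest := by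
  simp only [pvTS, List.filter_cons]
  split
  · simp
  · simp

lemma pvB_fold (results : List (String × List (String × List Int))) :
    ∀ (d : PySem.Dict Int Int) (n : Int),
    results.foldl (fun (st : PySem.Dict Int Int × Int) kv =>
      if PySem.Str.startswith kv.1 "threshold_" then
        ((pvTop3Set kv.2).foldl (fun d b => d.insert b (d.getD b 0 + 1)) st.1, st.2 + 1)
      else st) (d, n)
    = ((pvTS results).foldl pvStep d, n + ((pvTS results).length : Int)) := by
  induction results with
  | nil => intro d n; simp [pvTS]
  | cons kv rest ih =>
    intro d n
    rw [List.foldl_cons, pvTS_cons]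
    by_cases h : PySem.Str.startswith kv.1 "threshold_" = true
    · rw [if_pos h, if_pos h, ih, List.foldl_cons]
      simp only [Prod.mk.injEq, List.length_cons]
      exact ⟨rfl, by push_cast; ring⟩

    · rw [if_neg h, if_neg h, ih]

lemma pvStep_getD (s : List Int) (hs : s.Nodup) (d : PySem.Dict Int Int) (b : Int) :
    (pvStep d s).getD b 0 = d.getD b 0 + (if b ∈ s then (1 : Int) else 0) := by
  rw [pvStep, PySem.Dict.getD_foldl_insert_add_one]
  by_cases hb : b ∈ s
  · rw [List.count_eq_one_of_mem hs hb]; simp [hb]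
  · rw [List.count_eq_zero_of_not_mem hb]; simp [hb]

lemma pvFold_getD (L : List (List Int)) (hL : ∀ s ∈ L, s.Nodup) :
    ∀ (d : PySem.Dict Int Int) (b : Int),
    (L.foldl pvStep d).getD b 0
      = d.getD b 0 + (L.countP (fun s => decide (b ∈ s)) : Int) := by
  induction L with
  | nil => intro d b; simp
  | cons h t ih =>
    intro d b
    have hh : h.Nodup := hL h (by simp)
    rw [List.foldl_cons, ih (fun s hs => hL s (by simp [hs])), pvStep_getD h hh]
    rw [List.countP_cons]
    by_cases hb : b ∈ h
    · simp [hb]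
      ring
    · simp [hb]

lemma pvFold_keys (L : List (List Int)) :
    ∀ (d : PySem.Dict Int Int) (b : Int),
    b ∈ (L.foldl pvStep d).keys ↔ b ∈ d.keys ∨ ∃ s ∈ L, b ∈ s := by
  induction L with
  | nil => intro d b; simp
  | cons h t ih =>
    intro d b
    rw [List.foldl_cons, ih]
    have : (pvStep d h).keys = PySem.Set.update d.keys h := by
      rw [pvStep, PySem.Dict.keys_foldl_insert]
    rw [this, PySem.Set.mem_update]
    constructor
    · rintro ((hd | hh) | ht)
      · exact Or.inl hd
      · exact Or.inr ⟨h, by simp, hh⟩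
      · obtain ⟨s, hs, hb⟩ := ht; exact Or.inr ⟨s, by simp [hs], hb⟩
    · rintro (hd | ⟨s, hs, hb⟩)
      · exact Or.inl (Or.inl hd)
      · rcases List.mem_cons.mp hs with rfl | hs
        · exact Or.inl (Or.inr hb)
        · exact Or.inr ⟨s, hs, hb⟩

lemma pvFold_nodup (L : List (List Int)) :
    ∀ (d : PySem.Dict Int Int), d.keys.Nodup → (L.foldl pvStep d).keys.Nodup := by
  induction L with
  | nil => intro d hd; simpa using hd
  | cons h t ih =>
    intro d hd
    rw [List.foldl_cons]
    exact ih _ (by rw [pvStep]; exact PySem.Dict.nodup_keys_foldl_insert h _ d hd)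

lemma pvInter_mem (t : List (List Int)) :
    ∀ (first : List Int) (x : Int),
    x ∈ t.foldl PySem.Set.inter first ↔ x ∈ first ∧ ∀ s ∈ t, x ∈ s := by
  induction t with
  | nil => intro first x; simp
  | cons h tl ih =>
    intro first x
    rw [List.foldl_cons, ih, PySem.Set.mem_inter]
    constructor
    · rintro ⟨⟨hf, hh⟩, ht⟩
      exact ⟨hf, fun s hs => by rcases List.mem_cons.mp hs with rfl | hs; exact hh; exact ht s hs⟩
    · rintro ⟨hf, hall⟩
      exact ⟨⟨hf, hall h (by simp)⟩, fun s hs => hall s (by simp [hs])⟩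

lemma pvTS_nodup (results : List (String × List (String × List Int))) :
    ∀ s ∈ pvTS results, s.Nodup := by
  intro s hs
  obtain ⟨kv, _, rfl⟩ := List.mem_map.mp hs
  exact PySem.Set.nodup_ofList _

-- ===== VERDICT (by name: the statement is the Claim_ definition above) =====
theorem check_major_breaks_consistency_py_spec : Claim_equal_check_major_breaks_consistency_py := by
  intro results _ _
  unfold Spec_check_major_breaks_consistency_py
  unfold check_major_breaks_consistency_py check_major_breaks_consistency_py_alt
  rw [pvA_fold, pvB_fold]
  cases hts : pvTS results with
  | nil => simp
  | cons h t =>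
    have hTSnodup : ∀ s ∈ h :: t, s.Nodup := by rw [← hts]; exact pvTS_nodup results
    have hnodup : ((h :: t).foldl pvStep PySem.Dict.empty).keys.Nodup :=
      pvFold_nodup _ _ (by simp)
    have hcond : (((0:Int) + ((h :: t).length : Int)) == 0) = false := by
      simp
      omega
    simp only [hcond, Bool.false_eq_true, if_false]
    rw [PySem.Dict.values_eq_map_keys _ hnodup 0, List.any_map]
    rw [Bool.eq_iff_iff, decide_eq_true_iff, List.any_eq_true]
    have hgetD : ∀ x : Int, ((h :: t).foldl pvStep PySem.Dict.empty).getD x 0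
        = ((h :: t).countP (fun s => decide (x ∈ s)) : Int) := by
      intro x; rw [pvFold_getD (h :: t) hTSnodup]; simp
    constructor
    · intro hlen
      have hpos : 0 < (t.foldl PySem.Set.inter h).length := by
        simp only [PySem.Set.len] at hlen
        omega
      obtain ⟨x, hx⟩ := List.exists_mem_of_length_pos hpos
      obtain ⟨hxh, hxt⟩ := (pvInter_mem t h x).mp hx
      have hcp : (h :: t).countP (fun s => decide (x ∈ s)) = (h :: t).length := by
        rw [List.countP_eq_length]
        intro s hs
        rcases List.mem_cons.mp hs with rfl | hs
        · simpa using hxh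
        · simpa using hxt s hs
      refine ⟨x, (pvFold_keys (h :: t) PySem.Dict.empty x).mpr (Or.inr ⟨h, by simp, hxh⟩), ?_⟩
      simp only [Function.comp_apply, hgetD, hcp, beq_iff_eq]
      ring
    · rintro ⟨x, -, hx⟩
      simp only [Function.comp_apply, hgetD, beq_iff_eq] at hx
      have hcp : (h :: t).countP (fun s => decide (x ∈ s)) = (h :: t).length := by
        omega
      have hall := List.countP_eq_length.mp hcp
      have hmem : x ∈ t.foldl PySem.Set.inter h :=
        (pvInter_mem t h x).mpr ⟨by simpa using hall h (by simp),
          fun s hs => by simpa using hall s (by simp [hs])⟩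
      have hpos : 0 < (t.foldl PySem.Set.inter h).length := List.length_pos_of_mem hmem
      simp only [PySem.Set.len]
      omega
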